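-- pv_equiv track=rewrite | github.com/Demkeks/lysozyme_kinetics | src/parse_kinetics_txt.py | parse_kv_sections
-- ===== SOURCE A (Python) =====
-- from typing import Dict, List, Optional, Sequence, Tuple
--
-- SECTION_HEADERS = {
--     "Instrument",
--     "Instrument Parameters",
--     "Kinetic Data",
--     "Peak Detection",
--     "Peaks",
--     "Data Points",
-- }
--
-- def parse_kv_sections(lines: Sequence[str]) -> Dict[str, Dict[str, str]]:
--     section = "header"
--     sections: Dict[str, Dict[str, str]] = {section: {}}
--
--     for raw in lines:
--         line = raw.rstrip("\n")
--         stripped = line.strip()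
--         if not stripped:
--             continue
--         if stripped in SECTION_HEADERS:
--             section = stripped
--             sections.setdefault(section, {})
--             continue
--         if ":" not in line:
--             continue
--         key, value = line.split(":", 1)
--         key = key.strip()
--         value = value.strip().lstrip("\t").strip("'")
--         if key:
--             sections.setdefault(section, {})[key] = value
--     return sections
-- ===== SOURCE B (Python) =====
-- SECTION_HEADERS = {
--     "Instrument",
--     "Instrument Parameters",
--     "Kinetic Data",
--     "Peak Detection",
--     "Peaks",
--     "Data Points",
-- }
--
-- def parse_kv_sections(lines):
--     # pass 1: group the content lines under their section, in order of appearance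
--     section = "header"
--     groups = {section: []}
--     for raw in lines:
--         line = raw.rstrip("\n")
--         stripped = line.strip()
--         if not stripped:
--             continue
--         if stripped in SECTION_HEADERS:
--             section = stripped
--             groups.setdefault(section, [])
--         else:
--             groups[section].append(line)
--     # pass 2: parse every grouped line that carries a ':' into key/value
--     sections = {}
--     for name, content in groups.items():
--         result = {}
--         for line in content:
--             if ":" not in line:
--                 continue
--             key, value = line.split(":", 1)
--             key = key.strip()
--             if key:
--                 result[key] = value.strip().lstrip("\t").strip("'")
--         sections[name] = result
--     return sections
-- ===== Notes on version B (the rewrite author's own statement) =====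
-- stated objective: alternative
-- what changed: B replaces A's single pass that updates a nested dict per line with a two-pass decomposition: pass 1 groups the raw content lines under their section in an ordered dict of lists, pass 2 parses each section's group into its key/value dict.
import Mathlib
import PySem

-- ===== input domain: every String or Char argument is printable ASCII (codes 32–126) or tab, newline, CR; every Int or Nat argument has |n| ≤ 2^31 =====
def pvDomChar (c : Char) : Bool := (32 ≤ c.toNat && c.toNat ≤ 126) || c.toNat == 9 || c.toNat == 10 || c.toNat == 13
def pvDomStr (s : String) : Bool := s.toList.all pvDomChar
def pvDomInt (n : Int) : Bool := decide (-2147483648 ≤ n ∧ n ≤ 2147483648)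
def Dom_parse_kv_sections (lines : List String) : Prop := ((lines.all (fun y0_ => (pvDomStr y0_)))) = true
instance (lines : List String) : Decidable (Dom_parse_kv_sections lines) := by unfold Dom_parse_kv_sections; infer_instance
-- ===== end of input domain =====

-- B re-implements the parser as a two-pass decomposition (group lines per section, then parse each group);
-- same cost, alternative structure; return values proved equal on all inputs.


-- ===== PORT A =====
-- shared same-module constant SECTION_HEADERS (a set of distinct string literals)
def pvHeaders : List String :=
  ["Instrument", "Instrument Parameters", "Kinetic Data", "Peak Detection", "Peaks", "Data Points"]

-- raw.rstrip("\n") : drop trailing '\n' characters (hand port, exact: strips only the char '\n' from the right)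
def pvRstripNL (cs : List Char) : List Char := (cs.reverse.dropWhile (· == '\n')).reverse

-- line.split(":", 1) as the pair (before, after); exact when ':' occurs in cs (both programs guard with ':' in line)
def pvSplitColon1 (cs : List Char) : List Char × List Char :=
  (cs.takeWhile (· != ':'), (cs.dropWhile (· != ':')).drop 1)

-- value.strip().lstrip("\t").strip("'") (lstrip/strip with a chars argument hand-ported, exact: drop that char from the end(s))
def pvCleanVal (cs : List Char) : List Char :=
  let a := (PySem.Chars.strip cs).dropWhile (· == '\t')
  ((a.dropWhile (· == '\'')).reverse.dropWhile (· == '\'')).reverse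

-- A: one pass; state = (current section name, dict of section name -> dict of key -> value)
def pvStepA (st : String × PySem.Dict String (PySem.Dict String String)) (raw : String) :
    String × PySem.Dict String (PySem.Dict String String) :=
  let line := pvRstripNL raw.toList
  let stripped := PySem.Chars.strip line
  if stripped = [] then st
  else if pvHeaders.contains (String.ofList stripped) then
    (String.ofList stripped, st.2.setdefault (String.ofList stripped) PySem.Dict.empty)
  else if PySem.Chars.isIn [':'] line = false then st
  else
    let kv := pvSplitColon1 line
    let key := PySem.Chars.strip kv.1
    if key = [] then st
    else
      -- sections.setdefault(section, {})[key] = value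
      (st.1, (st.2.setdefault st.1 PySem.Dict.empty).modify st.1 PySem.Dict.empty
               (fun d => d.insert (String.ofList key) (String.ofList (pvCleanVal kv.2))))

def parse_kv_sections (lines : List String) : List (String × List (String × String)) :=
  let fin := lines.foldl pvStepA ("header", PySem.Dict.empty.insert "header" PySem.Dict.empty)
  fin.2.items.map (fun p => (p.1, p.2.items))

-- ===== PORT B =====
-- B pass 2 inner step: parse one grouped line into the section's result dict
def pvPG1 (d : PySem.Dict String String) (l : String) : PySem.Dict String String :=
  let line := l.toList
  if PySem.Chars.isIn [':'] line = false then d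
  else
    let kv := pvSplitColon1 line
    let key := PySem.Chars.strip kv.1
    if key = [] then d
    else d.insert (String.ofList key) (String.ofList (pvCleanVal kv.2))

def pvParseGroup (ls : List String) : PySem.Dict String String := ls.foldl pvPG1 PySem.Dict.empty

-- B pass 1 step: state = (current section name, dict of section name -> content lines)
def pvStepB (st : String × PySem.Dict String (List String)) (raw : String) :
    String × PySem.Dict String (List String) :=
  let line := pvRstripNL raw.toList
  let stripped := PySem.Chars.strip line
  if stripped = [] then st
  else if pvHeaders.contains (String.ofList stripped) then
    (String.ofList stripped, st.2.setdefault (String.ofList stripped) [])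
  else (st.1, st.2.modify st.1 [] (fun c => c ++ [String.ofList line]))

def parse_kv_sections_alt (lines : List String) : List (String × List (String × String)) :=
  let g := lines.foldl pvStepB ("header", PySem.Dict.empty.insert "header" [])
  g.2.items.map (fun p => (p.1, (pvParseGroup p.2).items))

-- ===== PRECONDITION & SPEC =====
def Spec_parse_kv_sections (lines : List String) (out : List (String × List (String × String))) : Prop := out = parse_kv_sections_alt lines
instance (lines : List String) (out : List (String × List (String × String))) : Decidable (Spec_parse_kv_sections lines out) := by unfold Spec_parse_kv_sections; infer_instance

-- ===== CLAIM (what is proved, stated in full; the proofs are below) =====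
def Claim_equal_parse_kv_sections : Prop := ∀ (lines : List String), Dom_parse_kv_sections lines → Spec_parse_kv_sections lines (parse_kv_sections lines)

-- ===== LEMMAS AND PROOFS =====

-- B's grouped dict, parsed sectionwise
def pvMapParse (g : PySem.Dict String (List String)) : PySem.Dict String (PySem.Dict String String) :=
  PySem.Dict.mk (g.items.map (fun p => (p.1, pvParseGroup p.2)))

-- the invariant tying A's state to B's first-pass state
def pvInv (a : String × PySem.Dict String (PySem.Dict String String))
    (b : String × PySem.Dict String (List String)) : Prop :=
  a.1 = b.1 ∧ a.2 = pvMapParse b.2 ∧ b.2.contains b.1 = true ∧ b.2.keys.Nodup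

theorem pvMapParse_contains (g : PySem.Dict String (List String)) (k : String) :
    (pvMapParse g).contains k = g.contains k := by
  simp [pvMapParse, PySem.Dict.contains, List.any_map, Function.comp_def]

theorem pvMapParse_keys (g : PySem.Dict String (List String)) :
    (pvMapParse g).keys = g.keys := by
  simp [pvMapParse, PySem.Dict.keys]

theorem pv_modify_items {ν : Type} (d : PySem.Dict String ν) (c : String) (dflt : ν) (f : ν → ν)
    (hn : d.keys.Nodup) (hc : d.contains c = true) :
    (d.modify c dflt f).items = d.items.map (fun p => if p.1 = c then (c, f p.2) else p) := by
  simp only [PySem.Dict.modify, PySem.Dict.insert, hc, if_pos]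
  apply List.map_congr_left
  intro p hp
  by_cases h : p.1 = c
  · have hm : (c, p.2) ∈ d.items := by rw [← h]; exact hp
    rw [PySem.Dict.getD_of_mem_items d hm hn dflt]
    simp [h]
  · simp [h]

theorem pvMapParse_nodup (g : PySem.Dict String (List String)) (h : g.keys.Nodup) :
    (pvMapParse g).keys.Nodup := by rw [pvMapParse_keys]; exact h

theorem pvStep_preserve (a : String × PySem.Dict String (PySem.Dict String String))
    (b : String × PySem.Dict String (List String)) (raw : String)
    (h : pvInv a b) : pvInv (pvStepA a raw) (pvStepB b raw) := by
  obtain ⟨a1, a2⟩ := a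
  obtain ⟨b1, b2⟩ := b
  obtain ⟨h1, h2, h3, h4⟩ := h
  simp only at h1 h2 h3 h4
  subst h1 h2
  have hkeys : ((b2.modify a1 [] (fun c => c ++ [String.ofList (pvRstripNL raw.toList)]))).keys = b2.keys := by
    rw [PySem.Dict.keys_modify, PySem.Dict.keys_insert_of_contains _ _ h3]
  have hcont : (b2.modify a1 [] (fun c => c ++ [String.ofList (pvRstripNL raw.toList)])).contains a1 = true := by
    rw [PySem.Dict.contains_modify]; simp
  have hnodup : (b2.modify a1 [] (fun c => c ++ [String.ofList (pvRstripNL raw.toList)])).keys.Nodup := by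
    rw [hkeys]; exact h4
  -- the parsed image of the B step: the current section's group entry gains the step pvPG1 _ line
  have hmain : pvMapParse (b2.modify a1 [] (fun c => c ++ [String.ofList (pvRstripNL raw.toList)]))
      = PySem.Dict.mk (b2.items.map (fun p =>
          if p.1 = a1 then (a1, pvPG1 (pvParseGroup p.2) (String.ofList (pvRstripNL raw.toList)))
          else (p.1, pvParseGroup p.2))) := by
    unfold pvMapParse
    rw [pv_modify_items _ _ _ _ h4 h3, List.map_map]
    congr 1
    apply List.map_congr_left
    intro p _
    by_cases hp : p.1 = a1
    · simp only [Function.comp, hp, if_pos, ite_true]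
      rw [pvParseGroup, pvParseGroup, List.foldl_append]
      rfl
    · simp [Function.comp, hp]
  unfold pvStepA pvStepB
  dsimp only
  split_ifs with he hh hcol hkey
  · -- blank line: both states unchanged
    exact ⟨rfl, rfl, h3, h4⟩
  · -- header line
    refine ⟨rfl, ?_, ?_, ?_⟩
    · by_cases hc : b2.contains (String.ofList (PySem.Chars.strip (pvRstripNL raw.toList))) = true
      · dsimp only
        rw [PySem.Dict.setdefault_of_contains _ _ hc,
          PySem.Dict.setdefault_of_contains _ _ (by rw [pvMapParse_contains]; exact hc)]
      · dsimp only
        simp only [PySem.Dict.setdefault, pvMapParse_contains, hc, Bool.false_eq_true, ite_false,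
          if_neg]
        simp only [pvMapParse, List.map_append, List.map_cons, List.map_nil]
        rfl
    · dsimp only
      rw [PySem.Dict.contains_setdefault]; simp
    · dsimp only
      rw [PySem.Dict.keys_setdefault]
      by_cases hc : b2.contains (String.ofList (PySem.Chars.strip (pvRstripNL raw.toList))) = true
      · simp [hc, h4]
      · simp only [hc, Bool.false_eq_true, ite_false, if_neg]
        refine List.Nodup.append h4 (List.nodup_singleton _) ?_
        intro x hx hx'
        simp only [List.mem_singleton] at hx'
        subst hx'
        exact hc ((PySem.Dict.contains_iff_mem_keys b2 _).mpr hx)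
  · -- content line without ':': A skips it, B's appended line parses to nothing
    refine ⟨rfl, ?_, hcont, hnodup⟩
    dsimp only
    rw [hmain]
    unfold pvMapParse
    congr 1
    apply List.map_congr_left
    intro p hp
    by_cases hp1 : p.1 = a1
    · simp [hp1, pvPG1, String.toList_ofList, hcol]
    · simp [hp1]
  · -- content line with ':' but an empty key: A skips it, B's appended line parses to nothing
    refine ⟨rfl, ?_, hcont, hnodup⟩
    dsimp only
    rw [hmain]
    unfold pvMapParse
    congr 1
    apply List.map_congr_left
    intro p hp
    by_cases hp1 : p.1 = a1
    · simp only [hp1, if_pos, ite_true]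
      simp only [pvPG1, String.toList_ofList, hcol, hkey]
      simp
    · simp [hp1]
  · -- real key/value line: A inserts into the current section's dict
    refine ⟨rfl, ?_, hcont, hnodup⟩
    dsimp only
    rw [hmain,
      PySem.Dict.setdefault_of_contains _ _ (by rw [pvMapParse_contains]; exact h3)]
    apply PySem.Dict.ext
    rw [pv_modify_items _ _ _ _ (pvMapParse_nodup b2 h4) (by rw [pvMapParse_contains]; exact h3)]
    unfold pvMapParse
    rw [List.map_map]
    apply List.map_congr_left
    intro p hp
    by_cases hp1 : p.1 = a1
    · simp only [Function.comp, hp1, if_pos, ite_true]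
      simp only [pvPG1, String.toList_ofList, hcol, hkey]
      simp
    · simp [Function.comp, hp1]

theorem pvFold_preserve (lines : List String)
    (a : String × PySem.Dict String (PySem.Dict String String))
    (b : String × PySem.Dict String (List String)) (h : pvInv a b) :
    pvInv (lines.foldl pvStepA a) (lines.foldl pvStepB b) := by
  induction lines generalizing a b with
  | nil => exact h
  | cons x t ih => exact ih _ _ (pvStep_preserve a b x h)

-- ===== VERDICT (by name: the statement is the Claim_ definition above) =====
theorem parse_kv_sections_spec : Claim_equal_parse_kv_sections := by
  intro lines _
  unfold Spec_parse_kv_sections parse_kv_sections parse_kv_sections_alt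
  have h := pvFold_preserve lines ("header", PySem.Dict.empty.insert "header" PySem.Dict.empty)
    ("header", PySem.Dict.empty.insert "header" []) (by constructor <;> simp <;> decide)
  obtain ⟨-, h2, -, -⟩ := h
  show (lines.foldl pvStepA ("header", PySem.Dict.empty.insert "header" PySem.Dict.empty)).2.items.map
      (fun p => (p.1, p.2.items)) =
    (lines.foldl pvStepB ("header", PySem.Dict.empty.insert "header" [])).2.items.map
      (fun p => (p.1, (pvParseGroup p.2).items))
  rw [h2]
  simp [pvMapParse]
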